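-- pv_equiv track=rewrite | github.com/PootieT/explain-then-translate | MultiPL-C2C/src/single_experiment_error_types.py | completion_is_nearly_all_comments
-- ===== SOURCE A (Python) =====
-- def completion_is_nearly_all_comments(script:str, func_sig_end="{", function_start="function", end_of_func="}", comment_start="#"):
--     lines = script.split("\n")
--     total_lines = 0
--     total_comments = 0
--     in_function=False
--     for i,l in enumerate(lines):
--         if l.startswith(end_of_func) and in_function:
--             break
--
--         if in_function:
--             total_lines += 1
--             if l.strip().startswith(comment_start):
--                 total_comments += 1
--
--         if l.strip().endswith(func_sig_end) or l.strip().startswith(function_start):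
--             in_function = True
--
--     if total_lines == total_comments:
--         # pdb.set_trace()
--         return True
--     if total_lines >= 4 and total_lines-total_comments <= 1:
--         # pdb.set_trace()
--         return True
--     return False
-- ===== SOURCE B (Python) =====
-- def completion_is_nearly_all_comments(script: str, func_sig_end="{", function_start="function", end_of_func="}", comment_start="#"):
--     lines = script.split("\n")
--     # phase 1: find the line opening the function body
--     start = None
--     for i, l in enumerate(lines):
--         s = l.strip()
--         if s.endswith(func_sig_end) or s.startswith(function_start):
--             start = i
--             break
--     if start is None:
--         return True  # empty body: 0 lines, 0 comments
--     # phase 2: find the closing line (raw text), body is the slice between them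
--     end = len(lines)
--     for j in range(start + 1, len(lines)):
--         if lines[j].startswith(end_of_func):
--             end = j
--             break
--     body = lines[start + 1:end]
--     # phase 3: count the body
--     total_lines = len(body)
--     total_comments = sum(1 for l in body if l.strip().startswith(comment_start))
--     return total_lines == total_comments or (total_lines >= 4 and total_lines - total_comments <= 1)
-- ===== Notes on version B (the rewrite author's own statement) =====
-- stated objective: simpler
-- what changed: Replaces the single interleaved stateful loop (in_function flag, break, running counters) with explicit boundary finding (start line, then end line), a slice for the body, and a separate counting pass over that slice.
import Mathlib
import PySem

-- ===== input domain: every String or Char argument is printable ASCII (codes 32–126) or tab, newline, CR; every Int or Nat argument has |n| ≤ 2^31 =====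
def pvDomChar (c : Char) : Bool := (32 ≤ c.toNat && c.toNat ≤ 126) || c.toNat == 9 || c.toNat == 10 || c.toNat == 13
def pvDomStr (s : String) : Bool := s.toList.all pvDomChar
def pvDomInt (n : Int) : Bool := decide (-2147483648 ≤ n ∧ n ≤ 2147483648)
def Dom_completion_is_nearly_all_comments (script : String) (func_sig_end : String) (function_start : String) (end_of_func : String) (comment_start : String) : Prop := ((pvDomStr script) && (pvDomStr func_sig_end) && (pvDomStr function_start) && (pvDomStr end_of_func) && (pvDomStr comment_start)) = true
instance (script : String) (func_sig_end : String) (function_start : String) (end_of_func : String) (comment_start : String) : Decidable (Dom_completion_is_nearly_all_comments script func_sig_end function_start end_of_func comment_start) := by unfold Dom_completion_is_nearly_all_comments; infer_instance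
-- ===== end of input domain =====

-- B finds the body boundaries first (start line, then end line) and counts a slice,
-- instead of A's single interleaved stateful loop; objective: simpler decomposition.


-- ===== PORT A =====
-- A's for-loop with its break and the in_function flag, as structural recursion over the lines.
def pvLoopA (func_sig_end function_start end_of_func comment_start : String) :
    List String → Int → Int → Bool → Int × Int
  | [], tl, tc, _ => (tl, tc)
  | l :: rest, tl, tc, inf =>
    if PySem.Str.startswith l end_of_func && inf then (tl, tc)
    else
      let tl' := if inf then tl + 1 else tl
      let tc' := if inf && PySem.Str.startswith (PySem.Str.strip l) comment_start then tc + 1 else tc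
      let inf' := inf || (PySem.Str.endswith (PySem.Str.strip l) func_sig_end ||
                          PySem.Str.startswith (PySem.Str.strip l) function_start)
      pvLoopA func_sig_end function_start end_of_func comment_start rest tl' tc' inf'

def completion_is_nearly_all_comments (script : String) (func_sig_end : String) (function_start : String) (end_of_func : String) (comment_start : String) : Bool :=
  let lines := (PySem.Str.split? script "\n").getD []
  let r := pvLoopA func_sig_end function_start end_of_func comment_start lines 0 0 false
  if r.1 = r.2 then true
  else if r.1 ≥ 4 ∧ r.1 - r.2 ≤ 1 then true
  else false

-- ===== PORT B =====
-- phase 1: find the line opening the function body; return the lines after it.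
def pvFindStart (func_sig_end function_start : String) : List String → Option (List String)
  | [] => none
  | l :: rest =>
    if PySem.Str.endswith (PySem.Str.strip l) func_sig_end ||
       PySem.Str.startswith (PySem.Str.strip l) function_start then some rest
    else pvFindStart func_sig_end function_start rest

-- phase 2: the slice up to (excluding) the first closing line (raw text test).
def pvBody (end_of_func : String) : List String → List String
  | [] => []
  | l :: rest =>
    if PySem.Str.startswith l end_of_func then []
    else l :: pvBody end_of_func rest

def completion_is_nearly_all_comments_alt (script : String) (func_sig_end : String) (function_start : String) (end_of_func : String) (comment_start : String) : Bool :=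
  let lines := (PySem.Str.split? script "\n").getD []
  match pvFindStart func_sig_end function_start lines with
  | none => true  -- empty body: 0 lines, 0 comments
  | some rest =>
    let body := pvBody end_of_func rest
    let total_lines : Int := body.length
    let total_comments : Int :=
      (body.countP (fun l => PySem.Str.startswith (PySem.Str.strip l) comment_start) : Nat)
    decide (total_lines = total_comments ∨ (total_lines ≥ 4 ∧ total_lines - total_comments ≤ 1))

-- ===== PRECONDITION & SPEC =====
def Spec_completion_is_nearly_all_comments (script : String) (func_sig_end : String) (function_start : String) (end_of_func : String) (comment_start : String) (out : Bool) : Prop := out = completion_is_nearly_all_comments_alt script func_sig_end function_start end_of_func comment_start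
instance (script : String) (func_sig_end : String) (function_start : String) (end_of_func : String) (comment_start : String) (out : Bool) : Decidable (Spec_completion_is_nearly_all_comments script func_sig_end function_start end_of_func comment_start out) := by unfold Spec_completion_is_nearly_all_comments; infer_instance

-- ===== CLAIM (what is proved, stated in full; the proofs are below) =====
def Claim_equal_completion_is_nearly_all_comments : Prop := ∀ (script : String) (func_sig_end : String) (function_start : String) (end_of_func : String) (comment_start : String), Dom_completion_is_nearly_all_comments script func_sig_end function_start end_of_func comment_start → Spec_completion_is_nearly_all_comments script func_sig_end function_start end_of_func comment_start (completion_is_nearly_all_comments script func_sig_end function_start end_of_func comment_start)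

-- ===== LEMMAS AND PROOFS =====

-- Once in_function is set, A's loop adds the body slice's length and comment count.
theorem pvLoopA_inFunction (fse fs eof cs : String) :
    ∀ (rest : List String) (tl tc : Int),
      pvLoopA fse fs eof cs rest tl tc true =
        (tl + ((pvBody eof rest).length : Int),
         tc + (((pvBody eof rest).countP
                 (fun l => PySem.Str.startswith (PySem.Str.strip l) cs) : Nat) : Int)) := by
  intro rest
  induction rest with
  | nil => intro tl tc; simp [pvLoopA, pvBody]
  | cons l rest ih =>
    intro tl tc
    by_cases h : PySem.Str.startswith l eof = true
    · simp only [PySem.Str.startswith_eq] at h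
      simp [pvLoopA, pvBody, h]
    · simp only [pvLoopA, pvBody, h, Bool.false_and, Bool.and_true, Bool.true_and,
        Bool.true_or, Bool.or_true, if_true, if_false, Bool.false_eq_true, ite_false,
        Bool.true_eq_false]
      rw [ih]
      simp only [List.countP_cons, List.length_cons, Prod.mk.injEq]
      constructor
      · push_cast; ring
      · split_ifs <;> push_cast <;> omega

-- Before in_function is set, A's loop is B's start search.
theorem pvLoopA_search (fse fs eof cs : String) :
    ∀ (lines : List String),
      pvLoopA fse fs eof cs lines 0 0 false =
        match pvFindStart fse fs lines with
        | none => (0, 0)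
        | some rest =>
          (((pvBody eof rest).length : Int),
           (((pvBody eof rest).countP
               (fun l => PySem.Str.startswith (PySem.Str.strip l) cs) : Nat) : Int)) := by
  intro lines
  induction lines with
  | nil => simp [pvLoopA, pvFindStart]
  | cons l rest ih =>
    by_cases h : (PySem.Str.endswith (PySem.Str.strip l) fse ||
                  PySem.Str.startswith (PySem.Str.strip l) fs) = true
    · simp only [pvLoopA, pvFindStart, h, Bool.and_false, Bool.false_eq_true, ite_false,
        Bool.false_or, if_true]
      rw [pvLoopA_inFunction]
      simp
    · simp only [pvLoopA, pvFindStart, h, Bool.and_false, Bool.false_eq_true, ite_false,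
        Bool.false_or, if_false]
      exact ih

-- ===== VERDICT (by name: the statement is the Claim_ definition above) =====
theorem completion_is_nearly_all_comments_spec : Claim_equal_completion_is_nearly_all_comments := by
  intro script fse fs eof cs _
  unfold Spec_completion_is_nearly_all_comments
  simp only [completion_is_nearly_all_comments, completion_is_nearly_all_comments_alt,
    pvLoopA_search]
  cases hfs : pvFindStart fse fs ((PySem.Str.split? script "\n").getD []) with
  | none => simp
  | some rest =>
    simp only []
    set tl : Int := ((pvBody eof rest).length : Int)
    set tc : Int := (((pvBody eof rest).countP
        (fun l => PySem.Str.startswith (PySem.Str.strip l) cs) : Nat) : Int)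
    by_cases h1 : tl = tc
    · simp [h1]
    · by_cases h2 : tl ≥ 4 ∧ tl - tc ≤ 1 <;> simp [h1, h2]
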